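-- pv_equiv track=rewrite | github.com/inessmit/adverse_event_analysis | faers_aes/src/make_PRR_pickles.py | restrict_min5drugs_per_ae
-- ===== SOURCE A (Python) =====
-- import itertools
--
-- def restrict_min5drugs_per_ae(molregno2ae_dict):
--     """Remove AEs with less than 5 significantly associated drugs and return new dictionary"""
--
--     all_aes = set([i for i in itertools.chain(*[molregno2ae_dict[molregno] for molregno in molregno2ae_dict.keys()])])
--
--     # Make new dictionary reversed and make empty set for each AE
--     ae2molregnos = dict()
--     for ae in all_aes:
--         ae2molregnos[ae] = set()
--     # Loop over molregnos in molregno2aes dictionary, and add the molregno to the ae2molregno dictionary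
--     for molregno in molregno2ae_dict:
--         for ae in molregno2ae_dict[molregno]:
--             ae2molregnos[ae].add(molregno)
--
--     # Loop over ae2molregnos dictionary and find those AEs with less than 5 compounds
--     aes_without_5_drugs = set()
--     for ae in ae2molregnos:
--         if len(ae2molregnos[ae]) < 5:
--             aes_without_5_drugs.add(ae)
--
--     # Make a new dictionary and remove those AEs with less than 5 compounds from the sets in molregno2ae
--     restricted_molregno2ae_dict = molregno2ae_dict.copy()
--     for ae in aes_without_5_drugs:
--         for molregno in restricted_molregno2ae_dict:
--             try:
--                 restricted_molregno2ae_dict[molregno].remove(ae)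
--             except KeyError:
--                 continue
--
--     return restricted_molregno2ae_dict
-- ===== SOURCE B (Python) =====
-- def restrict_min5drugs_per_ae(molregno2ae_dict):
--     """Remove AEs with less than 5 significantly associated drugs and return new dictionary"""
--     # Count, for each AE, the number of drugs it occurs with (values are sets,
--     # so occurrence count == distinct-drug count).
--     counts = {}
--     for aes in molregno2ae_dict.values():
--         for ae in aes:
--             counts[ae] = counts.get(ae, 0) + 1
--     good_aes = {ae for ae, c in counts.items() if c >= 5}
--     # Shallow copy, then intersect each set IN PLACE (same shared-set mutation as A's .remove loop).
--     result = molregno2ae_dict.copy()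
--     for molregno in result:
--         result[molregno] &= good_aes
--     return result
-- ===== Notes on version B (the rewrite author's own statement) =====
-- stated objective: simpler
-- what changed: A builds a reversed AE-to-drug-set dictionary (initialised from the set of all AEs, filled per drug) and then repeatedly calls set.remove per rare AE per drug inside try/except; B makes one counting pass over the value sets into a plain dict, forms the good-AE set, and intersects each drug's set in place with it.
import Mathlib
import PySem

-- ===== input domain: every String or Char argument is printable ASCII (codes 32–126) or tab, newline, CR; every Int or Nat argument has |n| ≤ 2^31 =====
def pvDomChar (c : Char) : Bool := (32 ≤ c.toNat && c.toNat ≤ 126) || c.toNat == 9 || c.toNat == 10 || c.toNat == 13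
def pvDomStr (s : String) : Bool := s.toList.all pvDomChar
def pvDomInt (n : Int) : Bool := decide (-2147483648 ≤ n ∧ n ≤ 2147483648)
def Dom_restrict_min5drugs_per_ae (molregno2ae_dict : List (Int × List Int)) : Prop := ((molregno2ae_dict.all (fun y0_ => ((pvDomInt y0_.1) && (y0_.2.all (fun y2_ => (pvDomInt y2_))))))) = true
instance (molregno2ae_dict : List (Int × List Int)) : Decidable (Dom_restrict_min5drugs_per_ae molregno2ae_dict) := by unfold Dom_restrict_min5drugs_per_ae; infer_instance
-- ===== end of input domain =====

-- B replaces A's reverse dictionary of drug-sets and its repeated remove loops by one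
-- counting pass and a per-key set intersection (objective: simpler). Like A, B returns a
-- shallow copy whose value sets are the caller's sets mutated in place.

-- ===== PORT A =====
def restrict_min5drugs_per_ae (molregno2ae_dict : List (Int × List Int)) : List (Int × List Int) :=
  let all_aes : PySem.Set Int :=
    PySem.Set.ofList (molregno2ae_dict.flatMap (fun kv => kv.2))
  let ae2molregnos0 : PySem.Dict Int (PySem.Set Int) :=
    all_aes.foldl (fun acc ae => acc.insert ae PySem.Set.empty) PySem.Dict.empty
  let ae2molregnos : PySem.Dict Int (PySem.Set Int) :=
    molregno2ae_dict.foldl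
      (fun acc kv => kv.2.foldl
        (fun acc2 ae => acc2.modify ae PySem.Set.empty (fun s => PySem.Set.add s kv.1)) acc)
      ae2molregnos0
  let aes_without_5_drugs : PySem.Set Int :=
    ae2molregnos.items.foldl
      (fun acc kv => if PySem.Set.len kv.2 < 5 then PySem.Set.add acc kv.1 else acc)
      PySem.Set.empty
  aes_without_5_drugs.foldl
    (fun acc ae => acc.map (fun kv => (kv.1, (PySem.Set.remove? kv.2 ae).getD kv.2)))
    molregno2ae_dict

-- ===== PORT B =====
def restrict_min5drugs_per_ae_alt (molregno2ae_dict : List (Int × List Int)) : List (Int × List Int) :=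
  let counts : PySem.Dict Int Int :=
    molregno2ae_dict.foldl
      (fun acc kv => kv.2.foldl (fun a ae => a.insert ae (a.getD ae 0 + 1)) acc)
      PySem.Dict.empty
  let good_aes : PySem.Set Int :=
    counts.items.foldl
      (fun acc kv => if 5 ≤ kv.2 then PySem.Set.add acc kv.1 else acc)
      PySem.Set.empty
  molregno2ae_dict.map (fun kv => (kv.1, PySem.Set.inter kv.2 good_aes))

-- ===== PRECONDITION & SPEC =====
-- Pre_ states the Python argument's TYPE: molregno2ae_dict is a dict (distinct keys) whose
-- values are sets (distinct elements). A Lean association list with duplicate keys or with a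
-- duplicated element inside a value does not represent any Python input of A.
def Pre_restrict_min5drugs_per_ae (molregno2ae_dict : List (Int × List Int)) : Prop :=
  (molregno2ae_dict.map Prod.fst).Nodup ∧ ∀ kv ∈ molregno2ae_dict, kv.2.Nodup
instance (molregno2ae_dict : List (Int × List Int)) : Decidable (Pre_restrict_min5drugs_per_ae molregno2ae_dict) := by
  unfold Pre_restrict_min5drugs_per_ae; infer_instance

def pvWitness_restrict_min5drugs_per_ae : (List (Int × List Int)) :=
  [(1, [10, 11]), (2, [10]), (3, [10, 12]), (4, [10]), (5, [10, 11]), (6, [])]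

def Spec_restrict_min5drugs_per_ae (molregno2ae_dict : List (Int × List Int)) (out : List (Int × List Int)) : Prop := out = restrict_min5drugs_per_ae_alt molregno2ae_dict
instance (molregno2ae_dict : List (Int × List Int)) (out : List (Int × List Int)) : Decidable (Spec_restrict_min5drugs_per_ae molregno2ae_dict out) := by unfold Spec_restrict_min5drugs_per_ae; infer_instance

-- ===== CLAIM (what is proved, stated in full; the proofs are below) =====
def Claim_equal_restrict_min5drugs_per_ae : Prop := ∀ (molregno2ae_dict : List (Int × List Int)), Dom_restrict_min5drugs_per_ae molregno2ae_dict → Pre_restrict_min5drugs_per_ae molregno2ae_dict → Spec_restrict_min5drugs_per_ae molregno2ae_dict (restrict_min5drugs_per_ae molregno2ae_dict)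

-- ===== LEMMAS AND PROOFS =====

-- the AEs both programs keep: those contained in at least 5 entries' value sets
def pvKeep (d : List (Int × List Int)) (y : Int) : Bool :=
  decide (5 ≤ d.countP (fun kv => decide (y ∈ kv.2)))

-- Set.update appends when everything stays fresh
theorem pv_update_nodup {s xs : List Int} (h : (s ++ xs).Nodup) :
    PySem.Set.update s xs = s ++ xs := by
  induction xs generalizing s with
  | nil => simp [PySem.Set.update]
  | cons x xs ih =>
    have hx : x ∉ s := by
      intro hmem
      exact List.Nodup.disjoint (l₁ := s) (l₂ := x :: xs) h hmem (by simp)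
    have hadd : PySem.Set.add s x = s ++ [x] := by
      simp [PySem.Set.add, PySem.Set.contains]
      intro hc; exact absurd hc hx
    have h2 : ((s ++ [x]) ++ xs).Nodup := by simpa using h
    calc PySem.Set.update s (x :: xs) = PySem.Set.update (PySem.Set.add s x) xs := rfl
      _ = (s ++ [x]) ++ xs := by rw [hadd]; exact ih h2
      _ = s ++ x :: xs := by simp

theorem pv_ofList_self {xs : List Int} (h : xs.Nodup) : PySem.Set.ofList xs = xs := by
  have : PySem.Set.update ([] : List Int) xs = [] ++ xs := pv_update_nodup (by simpa using h)
  simpa [PySem.Set.ofList, PySem.Set.update, PySem.Set.empty] using this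

-- Set.update is the identity when all new elements are already present
theorem pv_update_subset {s : List Int} {xs : List Int} (h : ∀ x ∈ xs, x ∈ s) :
    PySem.Set.update s xs = s := by
  induction xs generalizing s with
  | nil => simp [PySem.Set.update]
  | cons x xs ih =>
    have hx : x ∈ s := h x (by simp)
    have hadd : PySem.Set.add s x = s := by
      simp [PySem.Set.add, PySem.Set.contains, hx]
    calc PySem.Set.update s (x :: xs) = PySem.Set.update (PySem.Set.add s x) xs := rfl
      _ = s := by rw [hadd]; exact ih (fun y hy => h y (by simp [hy]))

theorem pv_contains_eq (s : List Int) (x : Int) :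
    PySem.Set.contains s x = decide (x ∈ s) := by
  simp [PySem.Set.contains]

theorem pv_count_nodup {l : List Int} (h : l.Nodup) (y : Int) :
    l.count y = if y ∈ l then 1 else 0 := by
  split_ifs with hm
  · have h1 := List.nodup_iff_count_le_one.mp h y
    have h2 := List.count_pos_iff.mpr hm
    omega
  · exact List.count_eq_zero.mpr hm

-- the nested counting fold of B computes membership counts (values are Nodup)
theorem pv_counts_getD (d : List (Int × List Int)) (a : PySem.Dict Int Int) (y : Int)
    (hv : ∀ kv ∈ d, kv.2.Nodup) :
    (d.foldl (fun acc kv => kv.2.foldl (fun a ae => a.insert ae (a.getD ae 0 + 1)) acc) a).getD y 0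
      = a.getD y 0 + (d.countP (fun kv => decide (y ∈ kv.2)) : Int) := by
  induction d generalizing a with
  | nil => simp
  | cons kv d ih =>
    have hstep := PySem.Dict.getD_foldl_insert_add_one (l := kv.2) (d := a) (v := y)
    rw [List.foldl_cons, ih _ (fun p hp => hv p (by simp [hp])), hstep,
      pv_count_nodup (hv kv (by simp)) y, List.countP_cons]
    by_cases hm : y ∈ kv.2 <;> simp [hm] <;> ring

-- keys of B's counting fold
theorem pv_counts_keys (d : List (Int × List Int)) (a : PySem.Dict Int Int) :
    (d.foldl (fun acc kv => kv.2.foldl (fun a ae => a.insert ae (a.getD ae 0 + 1)) acc) a).keys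
      = PySem.Set.update a.keys (d.flatMap (fun kv => kv.2)) := by
  induction d generalizing a with
  | nil => simp [PySem.Set.update]
  | cons kv d ih =>
    rw [List.foldl_cons, ih,
      PySem.Dict.keys_foldl_insert (l := kv.2) (f := fun a ae => a.getD ae 0 + 1) (d := a)]
    simp [PySem.Set.update, List.foldl_append]

theorem pv_nodup_counts_keys (d : List (Int × List Int)) (a : PySem.Dict Int Int)
    (h : a.keys.Nodup) :
    (d.foldl (fun acc kv => kv.2.foldl (fun a ae => a.insert ae (a.getD ae 0 + 1)) acc) a).keys.Nodup := by
  induction d generalizing a with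
  | nil => simpa
  | cons kv d ih =>
    exact ih _ (PySem.Dict.nodup_keys_foldl_insert kv.2 (fun a ae => a.getD ae 0 + 1) a h)

-- membership in the good_aes fold of B
theorem pv_mem_good (l : List (Int × Int)) (s : PySem.Set Int) (x : Int) :
    x ∈ l.foldl (fun acc kv => if 5 ≤ kv.2 then PySem.Set.add acc kv.1 else acc) s
      ↔ x ∈ s ∨ ∃ p ∈ l, 5 ≤ p.2 ∧ p.1 = x := by
  induction l generalizing s with
  | nil => simp
  | cons p l ih =>
    rw [List.foldl_cons]
    split_ifs with hp
    · rw [ih, PySem.Set.mem_add]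
      constructor
      · rintro ((h | rfl) | ⟨q, hq, h5, rfl⟩)
        · exact Or.inl h
        · exact Or.inr ⟨p, by simp, hp, rfl⟩
        · exact Or.inr ⟨q, by simp [hq], h5, rfl⟩
      · rintro (h | ⟨q, hq, h5, rfl⟩)
        · exact Or.inl (Or.inl h)
        · rcases List.mem_cons.mp hq with rfl | hq
          · exact Or.inl (Or.inr rfl)
          · exact Or.inr ⟨q, hq, h5, rfl⟩
    · rw [ih]
      constructor
      · rintro (h | ⟨q, hq, h5, rfl⟩)
        · exact Or.inl h
        · exact Or.inr ⟨q, by simp [hq], h5, rfl⟩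
      · rintro (h | ⟨q, hq, h5, rfl⟩)
        · exact Or.inl h
        · rcases List.mem_cons.mp hq with rfl | hq
          · exact absurd h5 hp
          · exact Or.inr ⟨q, hq, h5, rfl⟩

-- membership in the aes_without_5_drugs fold of A
theorem pv_mem_bad (l : List (Int × PySem.Set Int)) (s : PySem.Set Int) (x : Int) :
    x ∈ l.foldl (fun acc kv => if PySem.Set.len kv.2 < 5 then PySem.Set.add acc kv.1 else acc) s
      ↔ x ∈ s ∨ ∃ p ∈ l, PySem.Set.len p.2 < 5 ∧ p.1 = x := by
  induction l generalizing s with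
  | nil => simp
  | cons p l ih =>
    rw [List.foldl_cons]
    split_ifs with hp
    · rw [ih, PySem.Set.mem_add]
      constructor
      · rintro ((h | rfl) | ⟨q, hq, h5, rfl⟩)
        · exact Or.inl h
        · exact Or.inr ⟨p, by simp, hp, rfl⟩
        · exact Or.inr ⟨q, by simp [hq], h5, rfl⟩
      · rintro (h | ⟨q, hq, h5, rfl⟩)
        · exact Or.inl (Or.inl h)
        · rcases List.mem_cons.mp hq with rfl | hq
          · exact Or.inl (Or.inr rfl)
          · exact Or.inr ⟨q, hq, h5, rfl⟩
    · rw [ih]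
      constructor
      · rintro (h | ⟨q, hq, h5, rfl⟩)
        · exact Or.inl h
        · exact Or.inr ⟨q, by simp [hq], h5, rfl⟩
      · rintro (h | ⟨q, hq, h5, rfl⟩)
        · exact Or.inl h
        · rcases List.mem_cons.mp hq with rfl | hq
          · exact absurd h5 hp
          · exact Or.inr ⟨q, hq, h5, rfl⟩

-- the initial ae2molregnos0 dictionary of A
theorem pv_ae2m0_getD_of_not_mem (l : List Int) (a : PySem.Dict Int (PySem.Set Int)) (c : Int)
    (h : c ∉ l) :
    (l.foldl (fun acc ae => acc.insert ae PySem.Set.empty) a).getD c PySem.Set.empty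
      = a.getD c PySem.Set.empty := by
  induction l generalizing a with
  | nil => simp
  | cons x l ih =>
    rw [List.foldl_cons, ih _ (fun hm => h (by simp [hm]))]
    exact PySem.Dict.getD_insert_of_ne a _ _ (fun hc => h (by simp [hc]))

theorem pv_ae2m0_getD (l : List Int) (a : PySem.Dict Int (PySem.Set Int)) (c : Int) (h : c ∈ l) :
    (l.foldl (fun acc ae => acc.insert ae PySem.Set.empty) a).getD c PySem.Set.empty
      = PySem.Set.empty := by
  induction l generalizing a with
  | nil => simp at h
  | cons x l ih =>
    rw [List.foldl_cons]
    by_cases hc : c ∈ l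
    · exact ih _ hc
    · rcases List.mem_cons.mp h with rfl | hc2
      · rw [pv_ae2m0_getD_of_not_mem _ _ _ hc]
        exact PySem.Dict.getD_insert_self a c _ _
      · exact absurd hc2 hc

theorem pv_ae2m0_keys (l : List Int) (a : PySem.Dict Int (PySem.Set Int)) :
    (l.foldl (fun acc ae => acc.insert ae PySem.Set.empty) a).keys
      = PySem.Set.update a.keys l :=
  PySem.Dict.keys_foldl_insert l (fun _ _ => PySem.Set.empty) a

-- the inner modify/add fold of A, for one molregno m over its value set v
theorem pv_inner_getD (v : List Int) (m : Int) (a : PySem.Dict Int (PySem.Set Int)) (c : Int) :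
    (v.foldl (fun acc ae => acc.modify ae PySem.Set.empty (fun s => PySem.Set.add s m)) a).getD c PySem.Set.empty
      = PySem.Set.update (a.getD c PySem.Set.empty) ((v.filter (fun ae => ae == c)).map (fun _ => m)) := by
  induction v generalizing a with
  | nil => simp [PySem.Set.update]
  | cons ae v ih =>
    rw [List.foldl_cons, ih]
    rw [PySem.Dict.getD_modify]
    by_cases hc : c = ae
    · subst hc
      simp only [List.filter_cons, beq_self_eq_true, if_pos]
      rfl
    · rw [if_neg hc]
      have : (ae == c) = false := by simp [Ne.symm hc]
      simp [this]

theorem pv_inner_keys (v : List Int) (m : Int) (a : PySem.Dict Int (PySem.Set Int)) :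
    (v.foldl (fun acc ae => acc.modify ae PySem.Set.empty (fun s => PySem.Set.add s m)) a).keys
      = PySem.Set.update a.keys v :=
  PySem.Dict.keys_foldl_modify v PySem.Set.empty (fun _ _ s => PySem.Set.add s m) a

-- the outer fold of A building ae2molregnos: lookups …
theorem pv_ae2m_getD (d : List (Int × List Int)) (a : PySem.Dict Int (PySem.Set Int)) (c : Int)
    (hv : ∀ kv ∈ d, kv.2.Nodup) :
    (d.foldl (fun acc kv => kv.2.foldl
        (fun acc2 ae => acc2.modify ae PySem.Set.empty (fun s => PySem.Set.add s kv.1)) acc) a).getD c PySem.Set.empty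
      = PySem.Set.update (a.getD c PySem.Set.empty)
          ((d.filter (fun kv => decide (c ∈ kv.2))).map Prod.fst) := by
  induction d generalizing a with
  | nil => simp [PySem.Set.update]
  | cons kv d ih =>
    rw [List.foldl_cons, ih _ (fun p hp => hv p (by simp [hp])), pv_inner_getD]
    have hn : kv.2.Nodup := hv kv (by simp)
    have hfilt : (kv.2.filter (fun ae => ae == c)).map (fun _ => kv.1)
        = if c ∈ kv.2 then [kv.1] else [] := by
      rw [List.filter_beq, pv_count_nodup hn c]
      split_ifs <;> simp
    rw [hfilt, List.filter_cons]
    by_cases hm : c ∈ kv.2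
    · simp only [decide_eq_true_eq, hm, if_pos, List.map_cons]
      simp [PySem.Set.update]
    · simp only [decide_eq_true_eq, hm, if_neg, not_false_iff]
      simp [PySem.Set.update]

-- … and keys (they never grow once every AE is present)
theorem pv_ae2m_keys (d : List (Int × List Int)) (a : PySem.Dict Int (PySem.Set Int))
    (h : ∀ kv ∈ d, ∀ x ∈ kv.2, x ∈ a.keys) :
    (d.foldl (fun acc kv => kv.2.foldl
        (fun acc2 ae => acc2.modify ae PySem.Set.empty (fun s => PySem.Set.add s kv.1)) acc) a).keys
      = a.keys := by
  induction d generalizing a with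
  | nil => rfl
  | cons kv d ih =>
    have hkeys : ((kv.2.foldl
        (fun acc2 ae => acc2.modify ae PySem.Set.empty (fun s => PySem.Set.add s kv.1)) a)).keys
        = a.keys := by
      rw [pv_inner_keys]
      exact pv_update_subset (fun x hx => h kv (by simp) x hx)
    rw [List.foldl_cons, ih _ (fun p hp x hx => by rw [hkeys]; exact h p (by simp [hp]) x hx), hkeys]

-- A's removal step: try remove / except KeyError is a filter
theorem pv_remove_step (v : List Int) (ae : Int) :
    (PySem.Set.remove? v ae).getD v = v.filter (fun y => !(y == ae)) := by
  by_cases hm : ae ∈ v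
  · simp [PySem.Set.remove?, PySem.Set.discard, PySem.Set.contains, hm]
  · rw [PySem.Set.remove?]
    have hc : PySem.Set.contains v ae = false := by simp [PySem.Set.contains, hm]
    simp only [hc, Bool.false_eq_true, if_neg, not_false_iff, Option.getD_none]
    symm
    apply List.filter_eq_self.mpr
    intro y hy
    simp only [Bool.not_eq_eq_eq_not, Bool.not_true, beq_eq_false_iff_ne]
    rintro rfl; exact hm hy

theorem pv_fold_remove (bad v : List Int) :
    bad.foldl (fun v ae => (PySem.Set.remove? v ae).getD v) v
      = v.filter (fun y => !PySem.Set.contains bad y) := by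
  induction bad generalizing v with
  | nil => simp [PySem.Set.contains]
  | cons b bad ih =>
    rw [List.foldl_cons, pv_remove_step, ih, List.filter_filter]
    apply List.filter_congr
    intro y _
    simp only [pv_contains_eq, List.mem_cons]
    by_cases hyb : y = b <;> by_cases hmem : y ∈ bad <;> simp [hyb, hmem]

-- the final loop of A: per-key removal commutes with the map over the dictionary
theorem pv_map_fold (bad : List Int) (s : List (Int × List Int)) :
    bad.foldl (fun acc ae => acc.map (fun kv => (kv.1, (PySem.Set.remove? kv.2 ae).getD kv.2))) s
      = s.map (fun kv => (kv.1, bad.foldl (fun v ae => (PySem.Set.remove? v ae).getD v) kv.2)) := by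
  induction bad generalizing s with
  | nil => simp
  | cons b bad ih =>
    rw [List.foldl_cons, ih, List.map_map]
    rfl

-- B keeps exactly the AEs contained in ≥ 5 entries
theorem pv_good_iff (d : List (Int × List Int)) (y : Int)
    (hv : ∀ kv ∈ d, kv.2.Nodup)
    (hyF : y ∈ d.flatMap (fun kv => kv.2)) :
    (y ∈ (d.foldl
      (fun acc kv => kv.2.foldl (fun a ae => a.insert ae (a.getD ae 0 + 1)) acc)
      (PySem.Dict.empty : PySem.Dict Int Int)).items.foldl
      (fun acc kv => if 5 ≤ kv.2 then PySem.Set.add acc kv.1 else acc)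
      PySem.Set.empty)
      ↔ 5 ≤ d.countP (fun kv => decide (y ∈ kv.2)) := by
  have hkeys : (d.foldl
      (fun acc kv => kv.2.foldl (fun a ae => a.insert ae (a.getD ae 0 + 1)) acc)
      (PySem.Dict.empty : PySem.Dict Int Int)).keys = PySem.Set.ofList (d.flatMap (fun kv => kv.2)) := by
    rw [pv_counts_keys]; rfl
  have hnd : (d.foldl
      (fun acc kv => kv.2.foldl (fun a ae => a.insert ae (a.getD ae 0 + 1)) acc)
      (PySem.Dict.empty : PySem.Dict Int Int)).keys.Nodup := pv_nodup_counts_keys d PySem.Dict.empty (by simp [PySem.Dict.empty, PySem.Dict.keys])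
  have hitems := PySem.Dict.items_eq_map_keys _ hnd (0 : Int)
  rw [pv_mem_good, hitems, hkeys]
  constructor
  · rintro (h | ⟨p, hp, h5, hpy⟩)
    · simp [PySem.Set.empty] at h
    · obtain ⟨k, hkmem, rfl⟩ := List.mem_map.mp hp
      have hky : k = y := hpy
      subst hky
      have h5' : 5 ≤ (d.foldl
          (fun acc kv => kv.2.foldl (fun a ae => a.insert ae (a.getD ae 0 + 1)) acc)
          (PySem.Dict.empty : PySem.Dict Int Int)).getD k 0 := h5
      rw [pv_counts_getD d _ k hv] at h5'
      have hz : (PySem.Dict.empty : PySem.Dict Int Int).getD k 0 = 0 := rfl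
      rw [hz] at h5'
      omega
  · intro h5
    refine Or.inr ⟨(y, (d.foldl
        (fun acc kv => kv.2.foldl (fun a ae => a.insert ae (a.getD ae 0 + 1)) acc)
        (PySem.Dict.empty : PySem.Dict Int Int)).getD y 0), ?_, ?_, rfl⟩
    · exact List.mem_map.mpr ⟨y, (PySem.Set.mem_ofList _ _).mpr hyF, rfl⟩
    · show 5 ≤ _
      rw [pv_counts_getD d _ y hv]
      have hz : (PySem.Dict.empty : PySem.Dict Int Int).getD y 0 = 0 := rfl
      rw [hz]
      omega

-- A marks for removal exactly the AEs contained in < 5 entries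
theorem pv_bad_iff (d : List (Int × List Int)) (y : Int)
    (hk : (d.map Prod.fst).Nodup)
    (hv : ∀ kv ∈ d, kv.2.Nodup)
    (hyF : y ∈ d.flatMap (fun kv => kv.2)) :
    (y ∈ (d.foldl
      (fun acc kv => kv.2.foldl
        (fun acc2 ae => acc2.modify ae PySem.Set.empty (fun s => PySem.Set.add s kv.1)) acc)
      ((PySem.Set.ofList (d.flatMap (fun kv => kv.2))).foldl
        (fun acc ae => acc.insert ae PySem.Set.empty) (PySem.Dict.empty : PySem.Dict Int (PySem.Set Int)))).items.foldl
      (fun acc kv => if PySem.Set.len kv.2 < 5 then PySem.Set.add acc kv.1 else acc)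
      PySem.Set.empty)
      ↔ ¬ 5 ≤ d.countP (fun kv => decide (y ∈ kv.2)) := by
  have hnodF : (PySem.Set.ofList (d.flatMap (fun kv => kv.2))).Nodup := PySem.Set.nodup_ofList _
  have hkeys0 : ((PySem.Set.ofList (d.flatMap (fun kv => kv.2))).foldl
      (fun acc ae => acc.insert ae PySem.Set.empty) (PySem.Dict.empty : PySem.Dict Int (PySem.Set Int))).keys
      = PySem.Set.ofList (d.flatMap (fun kv => kv.2)) := by
    rw [pv_ae2m0_keys]
    show PySem.Set.ofList _ = _
    exact pv_ofList_self hnodF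
  have hkeysA : (d.foldl
      (fun acc kv => kv.2.foldl
        (fun acc2 ae => acc2.modify ae PySem.Set.empty (fun s => PySem.Set.add s kv.1)) acc)
      ((PySem.Set.ofList (d.flatMap (fun kv => kv.2))).foldl
        (fun acc ae => acc.insert ae PySem.Set.empty) (PySem.Dict.empty : PySem.Dict Int (PySem.Set Int)))).keys
      = PySem.Set.ofList (d.flatMap (fun kv => kv.2)) := by
    rw [pv_ae2m_keys, hkeys0]
    intro kv hkv x hx
    rw [hkeys0, PySem.Set.mem_ofList]
    exact List.mem_flatMap.mpr ⟨kv, hkv, hx⟩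
  have hnd : (d.foldl
      (fun acc kv => kv.2.foldl
        (fun acc2 ae => acc2.modify ae PySem.Set.empty (fun s => PySem.Set.add s kv.1)) acc)
      ((PySem.Set.ofList (d.flatMap (fun kv => kv.2))).foldl
        (fun acc ae => acc.insert ae PySem.Set.empty) (PySem.Dict.empty : PySem.Dict Int (PySem.Set Int)))).keys.Nodup := by
    rw [hkeysA]; exact hnodF
  -- the lookup at any c ∈ all AEs is the (Nodup) list of keys whose value set holds c
  have hgd : ∀ c ∈ d.flatMap (fun kv => kv.2), (d.foldl
      (fun acc kv => kv.2.foldl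
        (fun acc2 ae => acc2.modify ae PySem.Set.empty (fun s => PySem.Set.add s kv.1)) acc)
      ((PySem.Set.ofList (d.flatMap (fun kv => kv.2))).foldl
        (fun acc ae => acc.insert ae PySem.Set.empty) (PySem.Dict.empty : PySem.Dict Int (PySem.Set Int)))).getD c PySem.Set.empty
      = (d.filter (fun kv => decide (c ∈ kv.2))).map Prod.fst := by
    intro c hc
    rw [pv_ae2m_getD d _ c hv,
      pv_ae2m0_getD _ _ _ ((PySem.Set.mem_ofList _ _).mpr hc)]
    have hnodM : ((d.filter (fun kv => decide (c ∈ kv.2))).map Prod.fst).Nodup :=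
      hk.sublist ((d.filter_sublist (p := fun kv => decide (c ∈ kv.2))).map Prod.fst)
    show PySem.Set.ofList _ = _
    exact pv_ofList_self hnodM
  have hitems := PySem.Dict.items_eq_map_keys _ hnd PySem.Set.empty
  rw [pv_mem_bad, hitems, hkeysA]
  have hlen : PySem.Set.len ((d.filter (fun kv => decide (y ∈ kv.2))).map Prod.fst)
      = (d.countP (fun kv => decide (y ∈ kv.2)) : Int) := by
    simp [PySem.Set.len, List.countP_eq_length_filter]
  constructor
  · rintro (h | ⟨p, hp, h5, hpy⟩)
    · simp [PySem.Set.empty] at h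
    · obtain ⟨k, hkmem, rfl⟩ := List.mem_map.mp hp
      have hky : k = y := hpy
      subst hky
      have hkF : k ∈ d.flatMap (fun kv => kv.2) := (PySem.Set.mem_ofList _ _).mp hkmem
      have h5' : PySem.Set.len ((d.foldl
          (fun acc kv => kv.2.foldl
            (fun acc2 ae => acc2.modify ae PySem.Set.empty (fun s => PySem.Set.add s kv.1)) acc)
          ((PySem.Set.ofList (d.flatMap (fun kv => kv.2))).foldl
            (fun acc ae => acc.insert ae PySem.Set.empty) (PySem.Dict.empty : PySem.Dict Int (PySem.Set Int)))).getD k PySem.Set.empty) < 5 := h5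
      rw [hgd k hkF, hlen] at h5'
      omega
  · intro hlt
    refine Or.inr ⟨(y, (d.foldl
        (fun acc kv => kv.2.foldl
          (fun acc2 ae => acc2.modify ae PySem.Set.empty (fun s => PySem.Set.add s kv.1)) acc)
        ((PySem.Set.ofList (d.flatMap (fun kv => kv.2))).foldl
          (fun acc ae => acc.insert ae PySem.Set.empty) (PySem.Dict.empty : PySem.Dict Int (PySem.Set Int)))).getD y PySem.Set.empty), ?_, ?_, rfl⟩
    · exact List.mem_map.mpr ⟨y, (PySem.Set.mem_ofList _ _).mpr hyF, rfl⟩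
    · show PySem.Set.len _ < 5
      rw [hgd y hyF, hlen]
      omega

-- what A computes
theorem pv_A_eq (d : List (Int × List Int))
    (hk : (d.map Prod.fst).Nodup) (hv : ∀ kv ∈ d, kv.2.Nodup) :
    restrict_min5drugs_per_ae d = d.map (fun kv => (kv.1, kv.2.filter (pvKeep d))) := by
  simp only [restrict_min5drugs_per_ae]
  rw [pv_map_fold]
  apply List.map_congr_left
  intro kv hkv
  refine congrArg (Prod.mk kv.1) ?_
  rw [pv_fold_remove]
  apply List.filter_congr
  intro y hy
  have hyF : y ∈ d.flatMap (fun kv => kv.2) := List.mem_flatMap.mpr ⟨kv, hkv, hy⟩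
  have hiff := pv_bad_iff d y hk hv hyF
  rw [pv_contains_eq, ← decide_not]
  simp only [pvKeep]
  exact decide_eq_decide.mpr (by rw [hiff]; exact not_not)

-- what B computes
theorem pv_B_eq (d : List (Int × List Int))
    (hv : ∀ kv ∈ d, kv.2.Nodup) :
    restrict_min5drugs_per_ae_alt d = d.map (fun kv => (kv.1, kv.2.filter (pvKeep d))) := by
  simp only [restrict_min5drugs_per_ae_alt]
  apply List.map_congr_left
  intro kv hkv
  refine congrArg (Prod.mk kv.1) ?_
  show List.filter _ kv.2 = _
  apply List.filter_congr
  intro y hy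
  have hyF : y ∈ d.flatMap (fun kv => kv.2) := List.mem_flatMap.mpr ⟨kv, hkv, hy⟩
  have hiff := pv_good_iff d y hv hyF
  rw [pv_contains_eq]
  simp only [pvKeep]
  exact decide_eq_decide.mpr hiff

-- ===== VERDICT (by name: the statement is the Claim_ definition above) =====
theorem restrict_min5drugs_per_ae_spec : Claim_equal_restrict_min5drugs_per_ae := by
  intro d _ hpre
  unfold Spec_restrict_min5drugs_per_ae
  rw [pv_A_eq d hpre.1 hpre.2, pv_B_eq d hpre.2]
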